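-- pv_equiv track=rewrite | github.com/Ranjithkumar3005/python_programs | interview_qs/xot.py | generate_all_numbers
-- ===== SOURCE A (Python) =====
-- from itertools import combinations
--
-- def generate_all_numbers(num):
--     num_str = str(num)
--     length = len(num_str)
--     results = set()
--
--     # Generate all subsets by deleting digits
--     for i in range(1, length + 1):
--         for combo in combinations(num_str, i):
--             # Convert the tuple of digits back to an integer
--             results.add(int("".join(combo)))
--
--     return results
-- ===== SOURCE B (Python) =====
-- def generate_all_numbers(num):
--     s = str(num)
--     results = set()
--     # BFS over prefixes: each level holds (chosen-digits string, remaining suffix)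
--     level = [("", s)]
--     for _ in range(len(s)):
--         nxt = []
--         for p, rest in level:
--             for k in range(len(rest)):
--                 t = p + rest[k]
--                 results.add(int(t))
--                 nxt.append((t, rest[k + 1:]))
--         level = nxt
--     return results
-- ===== Notes on version B (the rewrite author's own statement) =====
-- stated objective: alternative
-- what changed: Replaces the per-size itertools.combinations enumeration with a BFS over (prefix, remaining-suffix) levels that extends each partial subsequence by one later digit per round, emitting each subsequence exactly once as it is built.
import Mathlib
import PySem

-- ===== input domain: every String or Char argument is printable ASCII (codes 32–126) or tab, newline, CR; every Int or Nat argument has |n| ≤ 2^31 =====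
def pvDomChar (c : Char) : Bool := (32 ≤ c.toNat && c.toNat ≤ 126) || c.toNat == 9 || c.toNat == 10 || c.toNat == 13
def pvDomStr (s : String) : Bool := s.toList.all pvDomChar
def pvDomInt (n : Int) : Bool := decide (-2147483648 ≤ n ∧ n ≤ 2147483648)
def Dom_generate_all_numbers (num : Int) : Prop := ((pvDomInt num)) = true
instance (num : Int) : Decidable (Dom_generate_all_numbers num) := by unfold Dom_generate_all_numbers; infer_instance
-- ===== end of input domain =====

-- B replaces the per-size combinations enumeration with a BFS over (prefix, suffix) levels; same cost, alternative decomposition.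

-- int("".join(cs)) for a digit string; under Pre_ (0 ≤ num) every generated string is all digits, so ofChars? is never none
def pvInt (cs : List Char) : Int := (PySem.Int.ofChars? cs).getD 0

-- ===== PORT A =====
-- hand port of itertools.combinations(s, i): all i-element subsequences, lexicographic by index (exact for itertools' order)
def combosA : List Char → Nat → List (List Char)
  | _, 0 => [[]]
  | [], _ + 1 => []
  | x :: xs, i + 1 => ((combosA xs i).map (fun c => x :: c)) ++ combosA xs (i + 1)

def generate_all_numbers (num : Int) : List Int :=
  let num_str := PySem.Int.toChars num
  let length := num_str.length
  (PySem.List.pyRange 1 ((length : Int) + 1) 1).foldl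
    (fun results i =>
      (combosA num_str i.toNat).foldl (fun r combo => PySem.Set.add r (pvInt combo)) results)
    PySem.Set.empty

-- ===== PORT B =====
-- inner 'for k in range(len(rest))' of Source B: walk rest, add int(p+rest[k]) and collect (p+rest[k], rest[k+1:])
def expandAdd (p : List Char) : PySem.Set Int → List Char → PySem.Set Int × List (List Char × List Char)
  | res, [] => (res, [])
  | res, c :: cs =>
      let t := p ++ [c]
      let res1 := PySem.Set.add res (pvInt t)
      let r := expandAdd p res1 cs
      (r.1, (t, cs) :: r.2)

def generate_all_numbers_alt (num : Int) : List Int :=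
  let s := PySem.Int.toChars num
  let n := s.length
  ((List.range n).foldl
    (fun st _ =>
      st.2.foldl
        (fun (acc : PySem.Set Int × List (List Char × List Char)) e =>
          let r := expandAdd e.1 acc.1 e.2
          (r.1, acc.2 ++ r.2))
        (st.1, ([] : List (List Char × List Char))))
    (PySem.Set.empty, [(([] : List Char), s)])).1

-- ===== PRECONDITION & SPEC =====
-- Pre_ excludes negative num, on which both Pythons raise ValueError (int('-') on the single-character subsequence '-')
def Pre_generate_all_numbers (num : Int) : Prop := 0 ≤ num
instance (num : Int) : Decidable (Pre_generate_all_numbers num) := by unfold Pre_generate_all_numbers; infer_instance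
def pvWitness_generate_all_numbers : Int := (10)

def Spec_generate_all_numbers (num : Int) (out : List Int) : Prop := out = generate_all_numbers_alt num
instance (num : Int) (out : List Int) : Decidable (Spec_generate_all_numbers num out) := by unfold Spec_generate_all_numbers; infer_instance

-- ===== CLAIM (what is proved, stated in full; the proofs are below) =====
def Claim_equal_generate_all_numbers : Prop := ∀ (num : Int), Dom_generate_all_numbers num → Pre_generate_all_numbers num → Spec_generate_all_numbers num (generate_all_numbers num)

-- ===== LEMMAS AND PROOFS =====

-- the entries Source B's inner loop collects from (p, rest): one per position of rest
def entriesOf (p : List Char) : List Char → List (List Char × List Char)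
  | [] => []
  | c :: cs => (p ++ [c], cs) :: entriesOf p cs

def addVals (res : PySem.Set Int) (L : List (List Char × List Char)) : PySem.Set Int :=
  L.foldl (fun r e => PySem.Set.add r (pvInt e.1)) res

def stepL (level : List (List Char × List Char)) : List (List Char × List Char) :=
  level.flatMap (fun e => entriesOf e.1 e.2)

-- size-i combinations paired with the suffix after the last chosen index
def combosR : List Char → Nat → List (List Char × List Char)
  | l, 0 => [([], l)]
  | [], _ + 1 => []
  | x :: xs, i + 1 => ((combosR xs i).map (fun e => (x :: e.1, e.2))) ++ combosR xs (i + 1)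

theorem expandAdd_eq (p : List Char) : ∀ (rest : List Char) (res : PySem.Set Int),
    expandAdd p res rest = (addVals res (entriesOf p rest), entriesOf p rest) := by
  intro rest
  induction rest with
  | nil => intro res; simp [expandAdd, entriesOf, addVals]
  | cons c cs ih => intro res; simp [expandAdd, entriesOf, addVals, ih]

theorem roundB_aux : ∀ (level : List (List Char × List Char)) (res : PySem.Set Int)
    (acc0 : List (List Char × List Char)),
    level.foldl
      (fun (acc : PySem.Set Int × List (List Char × List Char)) e =>
        (addVals acc.1 (entriesOf e.1 e.2), acc.2 ++ entriesOf e.1 e.2))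
      (res, acc0)
    = (addVals res (stepL level), acc0 ++ stepL level) := by
  intro level
  induction level with
  | nil => intro res acc0; simp [stepL, addVals]
  | cons e rest ih =>
      intro res acc0
      rw [List.foldl_cons, ih]
      simp [stepL, addVals, List.foldl_append, List.append_assoc]

theorem roundB_eq (level : List (List Char × List Char)) (res : PySem.Set Int)
    (acc0 : List (List Char × List Char)) :
    level.foldl
      (fun (acc : PySem.Set Int × List (List Char × List Char)) e =>
        ((expandAdd e.1 acc.1 e.2).1, acc.2 ++ (expandAdd e.1 acc.1 e.2).2))
      (res, acc0)
    = (addVals res (stepL level), acc0 ++ stepL level) := by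
  have hfun : (fun (acc : PySem.Set Int × List (List Char × List Char))
        (e : List Char × List Char) =>
        ((expandAdd e.1 acc.1 e.2).1, acc.2 ++ (expandAdd e.1 acc.1 e.2).2))
      = (fun (acc : PySem.Set Int × List (List Char × List Char))
        (e : List Char × List Char) =>
        (addVals acc.1 (entriesOf e.1 e.2), acc.2 ++ entriesOf e.1 e.2)) := by
    funext acc e
    rw [expandAdd_eq]
  rw [hfun, roundB_aux]

theorem entriesOf_cons_prefix (x : Char) (p : List Char) : ∀ rest : List Char,
    entriesOf (x :: p) rest = (entriesOf p rest).map (fun e => (x :: e.1, e.2)) := by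
  intro rest
  induction rest with
  | nil => simp [entriesOf]
  | cons c cs ih => simp [entriesOf, ih]

theorem stepL_append (a b : List (List Char × List Char)) :
    stepL (a ++ b) = stepL a ++ stepL b := by
  simp [stepL]

theorem stepL_map (x : Char) (L : List (List Char × List Char)) :
    stepL (L.map (fun e => (x :: e.1, e.2))) = (stepL L).map (fun e => (x :: e.1, e.2)) := by
  simp [stepL, List.flatMap_map, entriesOf_cons_prefix, List.map_flatMap]

theorem stepL_combosR : ∀ (l : List Char) (r : Nat), stepL (combosR l r) = combosR l (r + 1) := by
  intro l
  induction l with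
  | nil =>
      intro r
      cases r with
      | zero => simp [combosR, stepL, entriesOf]
      | succ r => simp [combosR, stepL]
  | cons x xs ih =>
      intro r
      cases r with
      | zero =>
          have h0 : stepL [(([] : List Char), xs)] = entriesOf [] xs := by
            simp [stepL]
          simp only [combosR, stepL, List.flatMap_cons, List.flatMap_nil, List.append_nil,
            entriesOf]
          have := ih 0
          rw [show combosR xs 0 = [(([] : List Char), xs)] by simp [combosR], h0] at this
          rw [this]
          simp
      | succ r =>
          simp only [combosR, stepL_append, stepL_map, ih]

theorem combosA_eq_map_fst : ∀ (l : List Char) (i : Nat),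
    combosA l i = (combosR l i).map Prod.fst := by
  intro l
  induction l with
  | nil =>
      intro i
      cases i with
      | zero => simp [combosA, combosR]
      | succ i => simp [combosA, combosR]
  | cons x xs ih =>
      intro i
      cases i with
      | zero => simp [combosA, combosR]
      | succ i => simp [combosA, combosR, ih, List.map_map, Function.comp_def]

theorem addVals_eq_foldA (res : PySem.Set Int) (l : List Char) (i : Nat) :
    addVals res (combosR l i)
      = (combosA l i).foldl (fun r combo => PySem.Set.add r (pvInt combo)) res := by
  rw [combosA_eq_map_fst, addVals, List.foldl_map]

-- main invariant: after k rounds B holds (A's partial fold over sizes 1..k, the size-k level)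
theorem main_inv (s : List Char) : ∀ (k : Nat),
    (List.range k).foldl
      (fun st _ =>
        st.2.foldl
          (fun (acc : PySem.Set Int × List (List Char × List Char)) e =>
            ((expandAdd e.1 acc.1 e.2).1, acc.2 ++ (expandAdd e.1 acc.1 e.2).2))
          (st.1, ([] : List (List Char × List Char))))
      (PySem.Set.empty, [(([] : List Char), s)])
    = ((List.range k).foldl
        (fun res j => (combosA s (j + 1)).foldl (fun r combo => PySem.Set.add r (pvInt combo)) res)
        PySem.Set.empty,
       combosR s k) := by
  intro k
  induction k with
  | zero => simp [combosR]
  | succ k ih =>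
      rw [List.range_succ, List.foldl_append, List.foldl_append, ih]
      simp only [List.foldl_cons, List.foldl_nil]
      rw [roundB_eq, stepL_combosR, addVals_eq_foldA]
      simp

-- ===== VERDICT (by name: the statement is the Claim_ definition above) =====
theorem generate_all_numbers_spec : Claim_equal_generate_all_numbers := by
  intro num _ _
  unfold Spec_generate_all_numbers
  simp only [generate_all_numbers, generate_all_numbers_alt]
  set s := PySem.Int.toChars num with hs
  rw [PySem.List.pyRange_one]
  have hn : ((s.length : Int) + 1 - 1).toNat = s.length := by omega
  rw [hn, List.foldl_map, main_inv]
  have h1 : ∀ (k : Nat), ((1 : Int) + (k : Int)).toNat = k + 1 := by intro k; omega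
  simp only [h1]
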